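-- pv_equiv track=rewrite | github.com/manas-17045/LeetcodeSolutions | Leetcode 2401-2500/2401/2401_2.py | longestNiceSubarray
-- ===== SOURCE A (Python) =====
-- def longestNiceSubarray(nums: list[int]) -> int:
--     """
--     Finds the length of the longest "nice" subarray.
--     A subarray is considered "nice" if the bitwise AND of every pair of numbers in it is 0.
--     This means no two numbers in the subarray share a common set bit.
--
--     Args:
--         nums: A list of integers.
--     Returns:
--         The length of the longest nice subarray.
--     """
--     # Bitwise OR of all numbers in the current window
--     mask = 0
--     # Left index of window
--     left = 0
--     # At least one element is always valid
--     best = 1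
--
--     for right, x in enumerate(nums):
--         # If x conflicts (shares any 1-bit) with the window, shrink from the left
--         while mask & x:
--             mask ^= nums[left]
--             left += 1
--         # Now, it's safe to include x
--         mask |= x
--         best = max(best, right - left + 1)
--
--     return best
-- ===== SOURCE B (Python) =====
-- def longestNiceSubarray(nums: list[int]) -> int:
--     # For each right endpoint, grow the window backwards while the new element
--     # shares no set bit with the OR of the window built so far; no sliding
--     # state is carried between endpoints.
--     best = 1
--     for right, x in enumerate(nums):
--         acc = x
--         left = right
--         while left > 0 and acc & nums[left - 1] == 0:
--             acc |= nums[left - 1]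
--             left -= 1
--         best = max(best, right - left + 1)
--     return best
-- ===== Notes on version B (the rewrite author's own statement) =====
-- stated objective: alternative
-- what changed: Replaces the stateful sliding window (OR-mask shrunk from the left by XOR) with a stateless per-endpoint backward expansion: for each right index the window is regrown leftwards while the next element is bit-disjoint from the accumulated OR, so no mask/left state crosses iterations and XOR never appears.
import Mathlib
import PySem

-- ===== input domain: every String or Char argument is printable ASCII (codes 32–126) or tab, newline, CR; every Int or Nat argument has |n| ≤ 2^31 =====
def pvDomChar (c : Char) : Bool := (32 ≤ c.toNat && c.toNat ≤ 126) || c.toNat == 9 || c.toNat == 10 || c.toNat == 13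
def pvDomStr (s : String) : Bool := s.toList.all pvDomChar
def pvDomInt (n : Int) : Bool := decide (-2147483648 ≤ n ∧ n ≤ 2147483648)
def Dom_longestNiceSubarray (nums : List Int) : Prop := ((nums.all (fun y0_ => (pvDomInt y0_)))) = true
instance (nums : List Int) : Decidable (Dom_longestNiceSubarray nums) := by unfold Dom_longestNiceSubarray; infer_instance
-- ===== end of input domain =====

-- B replaces A's stateful sliding window by a stateless per-endpoint backward expansion (alternative
-- decomposition, same return value on every input; neither mutates its argument).

-- ===== PORT A =====
-- inner `while mask & x: mask ^= nums[left]; left += 1`; the fuel argument only makes the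
-- recursion structural (the loop runs at most `right - left + 1 ≤ len nums` times, proved in the
-- lemmas below), and the `.getD 0` default on nums[left] is likewise unreachable on the loop's
-- reachable states (left stays in range).
def shrinkA (nums : List Int) (x : Int) : Nat → Int → Int → Int × Int
  | 0, mask, left => (mask, left)
  | fuel+1, mask, left =>
    if PySem.Int.band mask x ≠ 0 then
      shrinkA nums x fuel (PySem.Int.bxor mask (PySem.List.pyGetD nums left 0)) (left + 1)
    else (mask, left)

-- `for right, x in enumerate(nums): …` carrying (mask, left, best)
def loopA (nums : List Int) : List (Int × Int) → Int → Int → Int → Int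
  | [], _, _, best => best
  | (right, x) :: rest, mask, left, best =>
    let p := shrinkA nums x (nums.length + 1) mask left
    loopA nums rest (PySem.Int.bor p.1 x) p.2 (max best (right - p.2 + 1))

def longestNiceSubarray (nums : List Int) : Int :=
  loopA nums (PySem.List.enumerate nums) 0 0 1

-- ===== PORT B =====
-- inner `while left > 0 and acc & nums[left-1] == 0: acc |= nums[left-1]; left -= 1`,
-- recursion structural on left (a Nat, since left starts at the enumerate index)
def expandB (nums : List Int) : Int → Nat → Nat
  | _, 0 => 0
  | acc, l+1 =>
    let y := PySem.List.pyGetD nums (l : Int) 0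
    if PySem.Int.band acc y = 0 then expandB nums (PySem.Int.bor acc y) l else l + 1

def longestNiceSubarray_alt (nums : List Int) : Int :=
  (PySem.List.enumerate nums).foldl
    (fun best rx => max best (rx.1 - ((expandB nums rx.2 rx.1.toNat : Nat) : Int) + 1)) 1

-- ===== PRECONDITION & SPEC =====
def Spec_longestNiceSubarray (nums : List Int) (out : Int) : Prop := out = longestNiceSubarray_alt nums
instance (nums : List Int) (out : Int) : Decidable (Spec_longestNiceSubarray nums out) := by unfold Spec_longestNiceSubarray; infer_instance

-- ===== CLAIM (what is proved, stated in full; the proofs are below) =====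
def Claim_equal_longestNiceSubarray : Prop := ∀ (nums : List Int), Dom_longestNiceSubarray nums → Spec_longestNiceSubarray nums (longestNiceSubarray nums)

-- ===== LEMMAS AND PROOFS =====

-- ---- generic bitwise algebra for PySem.Int.band/bor/bxor, via Mathlib's Int.land/lor/xor ----

theorem natDisjAdd : ∀ m n : Nat, m &&& n = 0 → m + n = m ||| n := by
  intro m
  induction m using Nat.binaryRec with
  | zero => intro n _; simp
  | bit b m ih =>
    intro n hn
    induction n using Nat.bitCasesOn with
    | _ c n' =>
      rw [Nat.land_bit] at hn
      rcases Nat.bit_eq_zero_iff.mp hn with ⟨h1, h2⟩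
      rw [Nat.lor_bit]
      have hm := ih n' h1
      clear hn ih h1
      cases b <;> cases c <;> simp_all [Nat.bit] <;> omega

theorem natSubLandEqLdiff (m n : Nat) : m - (m &&& n) = Nat.ldiff m n := by
  have hd : (m &&& n) &&& Nat.ldiff m n = 0 := by
    apply Nat.eq_of_testBit_eq
    intro i
    simp only [Nat.testBit_land, Nat.testBit_ldiff, Nat.zero_testBit]
    cases m.testBit i <;> cases n.testBit i <;> rfl
  have ho : (m &&& n) ||| Nat.ldiff m n = m := by
    apply Nat.eq_of_testBit_eq
    intro i
    simp only [Nat.testBit_lor, Nat.testBit_land, Nat.testBit_ldiff]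
    cases m.testBit i <;> cases n.testBit i <;> rfl
  have := natDisjAdd _ _ hd
  omega

theorem negSucc_aux (n : Nat) : -Int.negSucc n - 1 = (n : Int) := by
  rw [Int.negSucc_eq]; ring

theorem band_eq_land (a b : Int) : PySem.Int.band a b = Int.land a b := by
  cases a with
  | ofNat m =>
    cases b with
    | ofNat n => simp [PySem.Int.band, Int.land]
    | negSucc n =>
      have hb : ¬ (0:Int) ≤ Int.negSucc n := by simp
      simp [PySem.Int.band, Int.land, hb, natSubLandEqLdiff]
  | negSucc m =>
    have ha : ¬ (0:Int) ≤ Int.negSucc m := by simp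
    cases b with
    | ofNat n =>
      simp [PySem.Int.band, Int.land, ha, natSubLandEqLdiff]
    | negSucc n =>
      have hb : ¬ (0:Int) ≤ Int.negSucc n := by simp
      simp only [PySem.Int.band, Int.land, ha, hb, if_false, negSucc_aux, Int.toNat_natCast]
      rw [Int.negSucc_eq]; ring
theorem bor_eq_lor (a b : Int) : PySem.Int.bor a b = Int.lor a b := by
  cases a with
  | ofNat m =>
    cases b with
    | ofNat n => simp [PySem.Int.bor, Int.lor]
    | negSucc n =>
      have hb : ¬ (0:Int) ≤ Int.negSucc n := by simp
      simp only [PySem.Int.bor, Int.lor, hb, if_false, negSucc_aux, Int.toNat_natCast,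
        Int.ofNat_eq_natCast, Int.natCast_nonneg, if_true]
      rw [Int.negSucc_eq, ← natSubLandEqLdiff, Nat.land_comm]
      ring_nf
  | negSucc m =>
    have ha : ¬ (0:Int) ≤ Int.negSucc m := by simp
    cases b with
    | ofNat n =>
      simp only [PySem.Int.bor, Int.lor, ha, if_false, negSucc_aux, Int.toNat_natCast,
        Int.ofNat_eq_natCast, Int.natCast_nonneg, if_true]
      rw [Int.negSucc_eq, ← natSubLandEqLdiff, Nat.land_comm]
      ring_nf
    | negSucc n =>
      have hb : ¬ (0:Int) ≤ Int.negSucc n := by simp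
      simp only [PySem.Int.bor, Int.lor, ha, hb, if_false, negSucc_aux, Int.toNat_natCast]
      rw [Int.negSucc_eq]; ring
theorem bxor_eq_xor (a b : Int) : PySem.Int.bxor a b = Int.xor a b := by
  cases a with
  | ofNat m =>
    cases b with
    | ofNat n => simp [PySem.Int.bxor, Int.xor]
    | negSucc n =>
      have hb : ¬ (0:Int) ≤ Int.negSucc n := by simp
      simp only [PySem.Int.bxor, Int.xor, hb, if_false, negSucc_aux, Int.toNat_natCast,
        Int.ofNat_eq_natCast, Int.natCast_nonneg, if_true]
      rw [Int.negSucc_eq]; ring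
  | negSucc m =>
    have ha : ¬ (0:Int) ≤ Int.negSucc m := by simp
    cases b with
    | ofNat n =>
      simp only [PySem.Int.bxor, Int.xor, ha, if_false, negSucc_aux, Int.toNat_natCast,
        Int.ofNat_eq_natCast, Int.natCast_nonneg, if_true]
      rw [Int.negSucc_eq]; ring
    | negSucc n =>
      have hb : ¬ (0:Int) ≤ Int.negSucc n := by simp
      simp [PySem.Int.bxor, Int.xor, ha, hb]
theorem intTestBitExt {a b : Int} (h : ∀ k, a.testBit k = b.testBit k) : a = b := by
  cases a with
  | ofNat m =>
    cases b with
    | ofNat n =>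
      have : m = n := Nat.eq_of_testBit_eq (fun i => h i)
      rw [this]
    | negSucc n =>
      exfalso
      have hk := h (max m n)
      have h1 : m.testBit (max m n) = false :=
        Nat.testBit_eq_false_of_lt (lt_of_lt_of_le Nat.lt_two_pow_self
          (Nat.pow_le_pow_right (by omega) (le_max_left m n)))
      have h2 : n.testBit (max m n) = false :=
        Nat.testBit_eq_false_of_lt (lt_of_lt_of_le Nat.lt_two_pow_self
          (Nat.pow_le_pow_right (by omega) (le_max_right m n)))
      rw [show (Int.ofNat m).testBit (max m n) = m.testBit (max m n) from rfl,
        show (Int.negSucc n).testBit (max m n) = !n.testBit (max m n) from rfl, h1, h2] at hk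
      simp at hk
  | negSucc m =>
    cases b with
    | ofNat n =>
      exfalso
      have hk := h (max m n)
      have h1 : m.testBit (max m n) = false :=
        Nat.testBit_eq_false_of_lt (lt_of_lt_of_le Nat.lt_two_pow_self
          (Nat.pow_le_pow_right (by omega) (le_max_left m n)))
      have h2 : n.testBit (max m n) = false :=
        Nat.testBit_eq_false_of_lt (lt_of_lt_of_le Nat.lt_two_pow_self
          (Nat.pow_le_pow_right (by omega) (le_max_right m n)))
      rw [show (Int.negSucc m).testBit (max m n) = !m.testBit (max m n) from rfl,
        show (Int.ofNat n).testBit (max m n) = n.testBit (max m n) from rfl, h1, h2] at hk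
      simp at hk
    | negSucc n =>
      have : m = n := Nat.eq_of_testBit_eq (fun i => by
        have := h i
        rw [show (Int.negSucc m).testBit i = !m.testBit i from rfl,
          show (Int.negSucc n).testBit i = !n.testBit i from rfl] at this
        exact Bool.not_inj this)
      rw [this]

theorem tb_band (a b : Int) (k : Nat) : (PySem.Int.band a b).testBit k = (a.testBit k && b.testBit k) := by
  rw [band_eq_land]; exact Int.testBit_land a b k

theorem tb_bor (a b : Int) (k : Nat) : (PySem.Int.bor a b).testBit k = (a.testBit k || b.testBit k) := by
  rw [bor_eq_lor]; exact Int.testBit_lor a b k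

theorem tb_bxor (a b : Int) (k : Nat) : (PySem.Int.bxor a b).testBit k = (a.testBit k ^^ b.testBit k) := by
  rw [bxor_eq_xor]; exact Int.testBit_lxor a b k

theorem tb_zero (k : Nat) : Int.testBit 0 k = false := by
  show Nat.testBit 0 k = false
  exact Nat.zero_testBit k

theorem int_eq_zero_iff (a : Int) : a = 0 ↔ ∀ k, a.testBit k = false := by
  constructor
  · rintro rfl k; exact tb_zero k
  · intro h; exact intTestBitExt (fun k => (h k).trans (tb_zero k).symm)

theorem band_zero_iff (a b : Int) : PySem.Int.band a b = 0 ↔ ∀ k, (a.testBit k && b.testBit k) = false := by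
  rw [int_eq_zero_iff]
  constructor
  · intro h k; rw [← tb_band]; exact h k
  · intro h k; rw [tb_band]; exact h k

theorem band_bor_iff (a b y : Int) :
    PySem.Int.band (PySem.Int.bor a b) y = 0 ↔ PySem.Int.band a y = 0 ∧ PySem.Int.band b y = 0 := by
  simp only [band_zero_iff]
  constructor
  · intro h
    constructor <;> intro k <;> have := h k <;> rw [tb_bor] at this <;>
      cases ha : a.testBit k <;> cases hb : b.testBit k <;> cases hy : y.testBit k <;> simp_all
  · rintro ⟨h1, h2⟩ k
    have := h1 k; have := h2 k
    rw [tb_bor]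
    cases ha : a.testBit k <;> cases hb : b.testBit k <;> cases hy : y.testBit k <;> simp_all

theorem bxor_bor_cancel (a b : Int) (h : PySem.Int.band a b = 0) :
    PySem.Int.bxor (PySem.Int.bor a b) a = b := by
  apply intTestBitExt
  intro k
  have := (band_zero_iff a b).mp h k
  rw [tb_bxor, tb_bor]
  cases ha : a.testBit k <;> cases hb : b.testBit k <;> simp_all

theorem bor_assoc' (a b c : Int) :
    PySem.Int.bor (PySem.Int.bor a b) c = PySem.Int.bor a (PySem.Int.bor b c) := by
  apply intTestBitExt
  intro k
  simp only [tb_bor, Bool.or_assoc]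

theorem bor_zero_left (a : Int) : PySem.Int.bor 0 a = a := by
  rw [PySem.Int.bor_comm]; exact PySem.Int.bor_zero a

theorem band_zero_left (a : Int) : PySem.Int.band 0 a = 0 := by
  rw [PySem.Int.band_comm]; exact PySem.Int.band_zero a

-- ---- windows, OR-accumulator and the "nice" predicate ----

def orL (w : List Int) : Int := w.foldl PySem.Int.bor 0

def niceW (w : List Int) : Prop := w.Pairwise (fun a b => PySem.Int.band a b = 0)

def winW (nums : List Int) (l r : Nat) : List Int := (nums.take r).drop l

theorem foldl_bor_init (w : List Int) (m : Int) : w.foldl PySem.Int.bor m = PySem.Int.bor m (orL w) := by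
  induction w generalizing m with
  | nil => simp [orL, PySem.Int.bor_zero]
  | cons a w ih =>
    show (w.foldl PySem.Int.bor (PySem.Int.bor m a)) = _
    rw [ih]
    show _ = PySem.Int.bor m (w.foldl PySem.Int.bor (PySem.Int.bor 0 a))
    rw [ih, bor_zero_left, bor_assoc']

theorem orL_cons (a : Int) (w : List Int) : orL (a :: w) = PySem.Int.bor a (orL w) := by
  show w.foldl PySem.Int.bor (PySem.Int.bor 0 a) = _
  rw [foldl_bor_init, bor_zero_left]

theorem orL_snoc (w : List Int) (x : Int) : orL (w ++ [x]) = PySem.Int.bor (orL w) x := by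
  simp [orL, List.foldl_append]

theorem band_orL_iff (y : Int) (w : List Int) :
    PySem.Int.band y (orL w) = 0 ↔ ∀ a ∈ w, PySem.Int.band y a = 0 := by
  induction w with
  | nil => simp [orL, PySem.Int.band_zero]
  | cons a w ih =>
    rw [orL_cons, PySem.Int.band_comm, band_bor_iff]
    simp only [List.mem_cons]
    constructor
    · rintro ⟨h1, h2⟩ b hb
      rcases hb with rfl | hb
      · rw [PySem.Int.band_comm]; exact h1
      · exact ih.mp (by rwa [PySem.Int.band_comm]) b hb
    · intro h
      refine ⟨by rw [PySem.Int.band_comm]; exact h a (Or.inl rfl), ?_⟩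
      rw [PySem.Int.band_comm]
      exact ih.mpr (fun b hb => h b (Or.inr hb))

theorem win_nil (nums : List Int) (r : Nat) : winW nums r r = [] := by
  apply List.eq_nil_of_length_eq_zero
  simp [winW]

theorem win_cons (nums : List Int) {l r : Nat} (h1 : l < r) (h2 : r ≤ nums.length) :
    winW nums l r = nums.getD l 0 :: winW nums (l+1) r := by
  have hl : l < (nums.take r).length := by simp; omega
  rw [winW, List.drop_eq_getElem_cons hl, List.getElem_take]
  congr 1
  rw [List.getD_eq_getElem nums 0 (by omega)]

theorem win_snoc (nums : List Int) {l r : Nat} (hr : r < nums.length) (hl : l ≤ r) :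
    winW nums l (r+1) = winW nums l r ++ [nums.getD r 0] := by
  rw [winW, List.take_add_one, winW]
  have : nums[r]?.toList = [nums.getD r 0] := by
    rw [List.getElem?_eq_getElem hr, List.getD_eq_getElem nums 0 hr]
    rfl
  rw [this, List.drop_append_of_le_length (by simp; omega)]

theorem win_drop (nums : List Int) (l d r : Nat) : (winW nums l r).drop d = winW nums (l + d) r := by
  rw [winW, winW, List.drop_drop]

-- the characterization both loops compute: the maximal nice window ending at index r
def Pw (nums : List Int) (l r : Nat) : Prop :=
  niceW (winW nums l (r+1)) ∧ (l = 0 ∨ ¬ niceW (winW nums (l-1) (r+1)))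

theorem P_unique {nums : List Int} {l1 l2 r : Nat} (e1 : l1 ≤ r) (e2 : l2 ≤ r)
    (h1 : Pw nums l1 r) (h2 : Pw nums l2 r) : l1 = l2 := by
  by_contra hne
  rcases Nat.lt_or_ge l1 l2 with h | h
  · rcases h2.2 with rfl | hmin
    · omega
    · apply hmin
      have : winW nums (l2-1) (r+1) = (winW nums l1 (r+1)).drop (l2-1-l1) := by
        rw [win_drop]; congr 1; omega
      rw [this]
      exact List.Pairwise.sublist (List.drop_sublist _ _) h1.1
  · rcases Nat.lt_or_ge l2 l1 with h' | h'
    · rcases h1.2 with rfl | hmin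
      · omega
      · apply hmin
        have : winW nums (l1-1) (r+1) = (winW nums l2 (r+1)).drop (l1-1-l2) := by
          rw [win_drop]; congr 1; omega
        rw [this]
        exact List.Pairwise.sublist (List.drop_sublist _ _) h2.1
    · omega

theorem shrink_spec (nums : List Int) (x : Int) :
    ∀ (fuel lN r : Nat), lN ≤ r → r ≤ nums.length → r - lN < fuel →
    niceW (winW nums lN r) →
    ∃ l', shrinkA nums x fuel (orL (winW nums lN r)) (lN : Int) = (orL (winW nums l' r), (l' : Int))
      ∧ lN ≤ l' ∧ l' ≤ r ∧ niceW (winW nums l' r)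
      ∧ PySem.Int.band (orL (winW nums l' r)) x = 0
      ∧ (l' = lN ∨ (0 < l' ∧ PySem.Int.band (nums.getD (l'-1) 0) x ≠ 0)) := by
  intro fuel
  induction fuel with
  | zero => intro lN r h1 h2 h3 _; omega
  | succ fuel ih =>
    intro lN r h1 h2 h3 hnice
    by_cases hb : PySem.Int.band (orL (winW nums lN r)) x = 0
    · refine ⟨lN, ?_, le_refl _, h1, hnice, hb, Or.inl rfl⟩
      simp only [shrinkA]
      rw [if_neg (by simpa using hb)]
    · have hlt : lN < r := by
        rcases Nat.lt_or_ge lN r with h | h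
        · exact h
        · exfalso
          have : lN = r := by omega
          subst this
          rw [win_nil] at hb
          exact hb (by simpa [orL] using band_zero_left x)
      have hw := win_cons nums hlt h2
      have hniceTail : niceW (winW nums (lN+1) r) := by
        rw [hw] at hnice; exact (List.pairwise_cons.mp hnice).2
      have hyall : ∀ a ∈ winW nums (lN+1) r, PySem.Int.band (nums.getD lN 0) a = 0 := by
        rw [hw] at hnice; exact (List.pairwise_cons.mp hnice).1
      have hyor : PySem.Int.band (nums.getD lN 0) (orL (winW nums (lN+1) r)) = 0 :=
        (band_orL_iff _ _).mpr hyall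
      have horw : orL (winW nums lN r)
          = PySem.Int.bor (nums.getD lN 0) (orL (winW nums (lN+1) r)) := by
        rw [hw, orL_cons]
      have hxor : PySem.Int.bxor (orL (winW nums lN r)) (nums.getD lN 0)
          = orL (winW nums (lN+1) r) := by
        rw [horw]; exact bxor_bor_cancel _ _ hyor
      obtain ⟨l', heq, hge, hle, hn', hb0, hlast⟩ := ih (lN+1) r (by omega) h2 (by omega) hniceTail
      refine ⟨l', ?_, by omega, hle, hn', hb0, ?_⟩
      · simp only [shrinkA]
        rw [if_pos (by simpa using hb), PySem.List.pyGetD_natCast, hxor,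
          show ((lN : Int) + 1) = ((lN + 1 : Nat) : Int) by push_cast; ring]
        exact heq
      · right
        rcases hlast with rfl | ⟨hpos, hneq⟩
        · refine ⟨by omega, ?_⟩
          intro hc
          apply hb
          rw [horw]
          exact (band_bor_iff _ _ _).mpr ⟨by simpa using hc, hb0⟩
        · exact ⟨by omega, hneq⟩

theorem expand_spec (nums : List Int) {r : Nat} (hr : r < nums.length) :
    ∀ (l : Nat), l ≤ r → niceW (winW nums l (r+1)) →
    ∃ l'', expandB nums (orL (winW nums l (r+1))) l = l''
      ∧ l'' ≤ l ∧ niceW (winW nums l'' (r+1))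
      ∧ (l'' = 0 ∨ ¬ niceW (winW nums (l''-1) (r+1))) := by
  intro l
  induction l with
  | zero => intro _ hnice; exact ⟨0, rfl, le_refl _, hnice, Or.inl rfl⟩
  | succ m ih =>
    intro hml hnice
    have hw := win_cons nums (show m < r+1 by omega) (show r+1 ≤ nums.length by omega)
    by_cases hb : PySem.Int.band (orL (winW nums (m+1) (r+1))) (nums.getD m 0) = 0
    · have hyall : ∀ a ∈ winW nums (m+1) (r+1), PySem.Int.band (nums.getD m 0) a = 0 :=
        (band_orL_iff _ _).mp (by rwa [PySem.Int.band_comm] at hb)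
      have hniceNew : niceW (winW nums m (r+1)) := by
        rw [hw]; exact List.pairwise_cons.mpr ⟨hyall, hnice⟩
      have hacc : PySem.Int.bor (orL (winW nums (m+1) (r+1))) (nums.getD m 0)
          = orL (winW nums m (r+1)) := by
        rw [hw, orL_cons, PySem.Int.bor_comm]
      obtain ⟨l'', heq, hle, hn'', hmin⟩ := ih (by omega) hniceNew
      refine ⟨l'', ?_, by omega, hn'', hmin⟩
      simp only [expandB]
      rw [PySem.List.pyGetD_natCast, if_pos hb, hacc]
      exact heq
    · refine ⟨m+1, ?_, le_refl _, hnice, Or.inr ?_⟩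
      · simp only [expandB]
        rw [PySem.List.pyGetD_natCast, if_neg hb]
      · intro hc
        rw [show m+1-1 = m by omega, hw] at hc
        apply hb
        rw [PySem.Int.band_comm]
        exact (band_orL_iff _ _).mpr (List.pairwise_cons.mp hc).1

theorem loop_eq (nums : List Int) :
    ∀ (t : List Int) (r lN : Nat) (best : Int),
    t = nums.drop r → r + t.length = nums.length →
    lN ≤ r → niceW (winW nums lN r) → (lN = 0 ∨ ¬ niceW (winW nums (lN-1) r)) →
    loopA nums (PySem.List.enumerate t r) (orL (winW nums lN r)) (lN : Int) best
      = (PySem.List.enumerate t r).foldl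
          (fun b rx => max b (rx.1 - ((expandB nums rx.2 rx.1.toNat : Nat) : Int) + 1)) best := by
  intro t
  induction t with
  | nil => intro r lN best _ _ _ _ _; simp [PySem.List.enumerate_nil, loopA]
  | cons y t' ihT =>
    intro r lN best ht hlen hle hnice hmin
    have hr : r < nums.length := by simp at hlen; omega
    have hdrop := List.drop_eq_getElem_cons hr
    rw [← ht] at hdrop
    have hy : y = nums.getD r 0 := by
      have := hdrop
      rw [List.getD_eq_getElem nums 0 hr]
      exact (List.cons.injEq _ _ _ _).mp this |>.1
    have ht' : t' = nums.drop (r+1) := (List.cons.injEq _ _ _ _).mp hdrop |>.2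
    -- A's shrink step
    obtain ⟨l', heq, hge, hle', hn', hb0, hlast⟩ :=
      shrink_spec nums (nums.getD r 0) (nums.length + 1) lN r hle (by omega) (by omega) hnice
    -- window extension facts
    have hwin1 : winW nums l' (r+1) = winW nums l' r ++ [nums.getD r 0] := win_snoc nums hr hle'
    have hxmem : nums.getD r 0 ∈ winW nums l' (r+1) := by
      rw [hwin1]; exact List.mem_append_right _ (List.mem_singleton.mpr rfl)
    have hniceExt : niceW (winW nums l' (r+1)) := by
      rw [hwin1]
      refine List.pairwise_append.mpr ⟨hn', List.pairwise_singleton _ _, ?_⟩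
      intro a ha b hbmem
      rw [List.mem_singleton.mp hbmem]
      have := (band_orL_iff _ _).mp (by rwa [PySem.Int.band_comm] at hb0) a ha
      rwa [PySem.Int.band_comm] at this
    have hminExt : l' = 0 ∨ ¬ niceW (winW nums (l'-1) (r+1)) := by
      rcases hlast with rfl | ⟨hpos, hneq⟩
      · rcases hmin with rfl | hmin
        · exact Or.inl rfl
        · refine Or.inr fun hc => hmin ?_
          rw [win_snoc nums hr (by omega)] at hc
          exact List.Pairwise.sublist (List.sublist_append_left _ _) hc
      · refine Or.inr fun hc => hneq ?_
        rw [win_cons nums (show l'-1 < r+1 by omega) (by omega),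
          show l'-1+1 = l' by omega] at hc
        exact (List.pairwise_cons.mp hc).1 _ hxmem
    have hPA : Pw nums l' r := ⟨hniceExt, hminExt⟩
    -- B's expand step on the same index
    have hsingle : orL (winW nums r (r+1)) = nums.getD r 0 := by
      rw [win_snoc nums hr (le_refl r), win_nil, List.nil_append, orL_cons]
      simp [orL, PySem.Int.bor_zero]
    obtain ⟨l'', heq2, hle2, hn2, hmin2⟩ := expand_spec nums hr r (le_refl r)
      (by rw [win_snoc nums hr (le_refl r), win_nil, List.nil_append]
          exact List.pairwise_singleton _ _)
    have hPB : Pw nums l'' r := ⟨hn2, hmin2⟩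
    have hll : l' = l'' := P_unique hle' (by omega) hPA hPB
    -- step both sides
    rw [PySem.List.enumerate_cons]
    show loopA nums (((r : Int), y) :: PySem.List.enumerate t' ((r : Int) + 1)) _ _ _ = _
    simp only [loopA, List.foldl_cons]
    rw [← hy] at heq
    rw [heq]
    have horUpd : PySem.Int.bor (orL (winW nums l' r)) y = orL (winW nums l' (r+1)) := by
      rw [hwin1, orL_snoc, hy]
    have hexp : ((expandB nums y ((r : Int)).toNat : Nat) : Int) = (l' : Int) := by
      rw [Int.toNat_natCast, hy, ← hsingle, heq2, hll]
    rw [horUpd, hexp,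
      show ((r : Int) + 1) = ((r + 1 : Nat) : Int) by push_cast; ring]
    exact ihT (r+1) l' (max best ((r : Int) - (l' : Int) + 1)) ht' (by simp at hlen ⊢; omega)
      (by omega) hniceExt (by simpa using hminExt)

-- ===== VERDICT (by name: the statement is the Claim_ definition above) =====
theorem longestNiceSubarray_spec : Claim_equal_longestNiceSubarray := by
  intro nums _
  show _ = _
  unfold longestNiceSubarray longestNiceSubarray_alt
  have h := loop_eq nums nums 0 0 1 (by simp) (by simp) (by omega)
    (by rw [win_nil]; exact List.Pairwise.nil) (Or.inl rfl)
  simpa [win_nil, orL] using h
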